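-- pv_equiv track=rewrite | github.com/jairsan/Segmentation-Free_Streaming_Machine_Translation | experiments/iwslt22_deen/models/Transformer_BIG_ds/document-mt/infer_doc_stream_with_offline_model.py | filter_length
-- ===== SOURCE A (Python) =====
-- def compute_length_buffer(buf):
--     length=0
--     for s in buf:
--         length+= len(s.split(" "))
--     return length
--
-- def filter_length( s_buf,t_buf, length_limit):
--     while compute_length_buffer(s_buf) > length_limit or compute_length_buffer(t_buf) > length_limit:
--         if len(s_buf) > 1:
--             s_buf.pop(0)
--             t_buf.pop(0)
--         else:
--             break
--
--     return compute_length_buffer(s_buf), compute_length_buffer(t_buf)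
-- ===== SOURCE B (Python) =====
-- def filter_length(s_buf, t_buf, length_limit):
--     # Precompute per-segment token counts once, then drop from the front
--     # with running sums: O(total size) instead of re-summing both buffers
--     # on every iteration. Note: does not mutate s_buf/t_buf (A pops in place);
--     # the equivalence claimed is about the return value.
--     cs = [len(s.split(" ")) for s in s_buf]
--     ct = [len(t.split(" ")) for t in t_buf]
--     S, T = sum(cs), sum(ct)
--     k = 0
--     while (S > length_limit or T > length_limit) and k < len(cs) - 1:
--         S -= cs[k]
--         if k < len(ct):
--             T -= ct[k]
--         k += 1
--     return S, T
-- ===== Notes on version B (the rewrite author's own statement) =====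
-- stated objective: faster
-- what changed: Per-segment token counts are computed once and the drop loop maintains running sums decremented incrementally, instead of re-summing both whole buffers on every while-test.
import Mathlib
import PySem

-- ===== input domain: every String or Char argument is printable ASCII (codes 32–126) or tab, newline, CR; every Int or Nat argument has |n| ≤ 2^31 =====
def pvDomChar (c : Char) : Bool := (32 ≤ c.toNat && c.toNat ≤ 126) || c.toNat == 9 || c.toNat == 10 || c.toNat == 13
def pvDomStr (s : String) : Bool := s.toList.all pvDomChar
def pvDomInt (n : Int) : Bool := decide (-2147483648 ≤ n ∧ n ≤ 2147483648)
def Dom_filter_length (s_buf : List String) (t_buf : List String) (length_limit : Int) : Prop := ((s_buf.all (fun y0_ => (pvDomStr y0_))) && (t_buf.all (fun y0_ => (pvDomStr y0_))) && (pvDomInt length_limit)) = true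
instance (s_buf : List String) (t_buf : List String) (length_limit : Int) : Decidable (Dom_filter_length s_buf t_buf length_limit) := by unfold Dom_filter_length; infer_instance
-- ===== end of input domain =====

-- B replaces A's re-summing of both whole buffers on every while-test by token
-- counts computed once plus running sums (objective: faster; asymptotic).
-- A mutates s_buf/t_buf in place (pop(0)); B does not: the equivalence proved
-- here is about the RETURN value only.

-- ===== PORT A =====
def compute_length_buffer (buf : List String) : Int :=
  buf.foldl (fun length s => length + (((PySem.Str.split? s " ").getD []).length : Int)) 0

def filter_length_loop (length_limit : Int) (s_buf t_buf : List String) : List String × List String :=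
  if compute_length_buffer s_buf > length_limit ∨ compute_length_buffer t_buf > length_limit then
    if 1 < s_buf.length then
      match s_buf, t_buf with
      | _ :: s', _ :: t' => filter_length_loop length_limit s' t'
      | _, _ => (s_buf, t_buf)  -- t_buf = []: Python's t_buf.pop(0) raises IndexError here (excluded by Pre_)
    else (s_buf, t_buf)
  else (s_buf, t_buf)
termination_by s_buf.length
decreasing_by simp

def filter_length (s_buf : List String) (t_buf : List String) (length_limit : Int) : Int × Int :=
  (compute_length_buffer (filter_length_loop length_limit s_buf t_buf).1,
   compute_length_buffer (filter_length_loop length_limit s_buf t_buf).2)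

-- ===== PORT B =====
-- Source B's while loop over index k, carried here as the suffixes of cs/ct from k;
-- 'k < len(cs) - 1' is 'the cs-suffix has at least two elements'.
def filter_length_alt_loop (length_limit : Int) : List Int → List Int → Int → Int → Int × Int
  | c :: c2 :: cs, ct, S, T =>
      if S > length_limit ∨ T > length_limit then
        match ct with
        | d :: ct' => filter_length_alt_loop length_limit (c2 :: cs) ct' (S - c) (T - d)
        | [] => filter_length_alt_loop length_limit (c2 :: cs) [] (S - c) T   -- 'if k < len(ct)' guard: t-sum unchanged
      else (S, T)
  | _, _, S, T => (S, T)

def filter_length_alt (s_buf : List String) (t_buf : List String) (length_limit : Int) : Int × Int :=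
  let cs := s_buf.map (fun s => (((PySem.Str.split? s " ").getD []).length : Int))
  let ct := t_buf.map (fun t => (((PySem.Str.split? t " ").getD []).length : Int))
  filter_length_alt_loop length_limit cs ct cs.sum ct.sum

-- ===== PRECONDITION & SPEC =====
-- Pre_ excludes exactly the inputs on which A raises IndexError (t_buf.pop(0)
-- with t_buf already exhausted while the remaining s_buf still exceeds the limit).
def Pre_filter_length (s_buf : List String) (t_buf : List String) (length_limit : Int) : Prop :=
  ¬ (t_buf.length + 2 ≤ s_buf.length ∧
     (((s_buf.drop t_buf.length).map (fun s => (((PySem.Str.split? s " ").getD []).length : Int))).sum > length_limit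
      ∨ length_limit < 0))
instance (s_buf : List String) (t_buf : List String) (length_limit : Int) : Decidable (Pre_filter_length s_buf t_buf length_limit) := by unfold Pre_filter_length; infer_instance

def pvWitness_filter_length : List String × List String × Int := (["a b", "c"], ["x y z"], 2)

def Spec_filter_length (s_buf : List String) (t_buf : List String) (length_limit : Int) (out : Int × Int) : Prop := out = filter_length_alt s_buf t_buf length_limit
instance (s_buf : List String) (t_buf : List String) (length_limit : Int) (out : Int × Int) : Decidable (Spec_filter_length s_buf t_buf length_limit out) := by unfold Spec_filter_length; infer_instance

-- ===== CLAIM (what is proved, stated in full; the proofs are below) =====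
def Claim_equal_filter_length : Prop := ∀ (s_buf : List String) (t_buf : List String) (length_limit : Int), Dom_filter_length s_buf t_buf length_limit → Pre_filter_length s_buf t_buf length_limit → Spec_filter_length s_buf t_buf length_limit (filter_length s_buf t_buf length_limit)

-- ===== LEMMAS AND PROOFS =====

-- s.split(" ") has a nonempty separator, so PySem.Str.split? is always `some`;
-- the `.getD []` in both ports is never reached.
def pvCnt (s : String) : Int := (((PySem.Str.split? s " ").getD []).length : Int)

lemma clb_eq_sum (buf : List String) : compute_length_buffer buf = (buf.map pvCnt).sum := by
  unfold compute_length_buffer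
  rw [PySem.List.foldl_add]
  simp only [zero_add]
  rfl

lemma clb_eq_sum' (buf : List String) :
    compute_length_buffer buf
      = (buf.map (fun s => (((PySem.Str.split? s " ").getD []).length : Int))).sum :=
  clb_eq_sum buf

lemma clb_cons (a : String) (l : List String) :
    compute_length_buffer (a :: l) = pvCnt a + compute_length_buffer l := by
  simp [clb_eq_sum, List.map_cons]

lemma loopA_cond_false {L : Int} {s t : List String}
    (hc : ¬ (compute_length_buffer s > L ∨ compute_length_buffer t > L)) :
    filter_length_loop L s t = (s, t) := by
  rw [filter_length_loop.eq_def, if_neg hc]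

lemma loopA_nil {L : Int} {t : List String} : filter_length_loop L [] t = ([], t) := by
  rw [filter_length_loop.eq_def]
  simp

lemma loopA_one {L : Int} {a : String} {t : List String} :
    filter_length_loop L [a] t = ([a], t) := by
  rw [filter_length_loop.eq_def]
  simp

lemma loopA_pop {L : Int} {a a2 b : String} {s' t' : List String}
    (hc : compute_length_buffer (a :: a2 :: s') > L ∨ compute_length_buffer (b :: t') > L) :
    filter_length_loop L (a :: a2 :: s') (b :: t') = filter_length_loop L (a2 :: s') t' := by
  rw [filter_length_loop.eq_def, if_pos hc,
    if_pos (by simp : 1 < (a :: a2 :: s').length)]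

lemma altLoop_nil {L S T : Int} {ct : List Int} :
    filter_length_alt_loop L [] ct S T = (S, T) := rfl

lemma altLoop_single {L c S T : Int} {ct : List Int} :
    filter_length_alt_loop L [c] ct S T = (S, T) := rfl

lemma altLoop_cond_false {L c c2 S T : Int} {cs ct : List Int} (hc : ¬ (S > L ∨ T > L)) :
    filter_length_alt_loop L (c :: c2 :: cs) ct S T = (S, T) := by
  simp only [filter_length_alt_loop]
  rw [if_neg hc]

lemma altLoop_step {L c c2 d S T : Int} {cs ct' : List Int} (hc : S > L ∨ T > L) :
    filter_length_alt_loop L (c :: c2 :: cs) (d :: ct') S T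
      = filter_length_alt_loop L (c2 :: cs) ct' (S - c) (T - d) := by
  simp only [filter_length_alt_loop]
  rw [if_pos hc]

lemma loop_eq (L : Int) : ∀ (s t : List String),
    Pre_filter_length s t L →
    (compute_length_buffer (filter_length_loop L s t).1,
     compute_length_buffer (filter_length_loop L s t).2)
      = filter_length_alt_loop L (s.map pvCnt) (t.map pvCnt)
          (compute_length_buffer s) (compute_length_buffer t) := by
  intro s
  induction s with
  | nil =>
    intro t _
    simp [loopA_nil, altLoop_nil]
  | cons a s ih =>
    intro t hpre
    cases s with
    | nil =>
      simp [loopA_one, altLoop_single]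
    | cons a2 s' =>
      by_cases hc : compute_length_buffer (a :: a2 :: s') > L ∨ compute_length_buffer t > L
      · cases t with
        | nil =>
          exfalso
          apply hpre
          constructor
          · simp
          · have h0 : compute_length_buffer ([] : List String) = 0 := rfl
            rw [h0] at hc
            simp only [List.length_nil, List.drop_zero]
            rw [← clb_eq_sum']
            omega
        | cons b t' =>
          have hpre' : Pre_filter_length (a2 :: s') t' L := by
            unfold Pre_filter_length at hpre ⊢
            intro h
            obtain ⟨h1, h2⟩ := h
            refine hpre ⟨by simp at h1 ⊢; omega, by simpa using h2⟩
          have e1 : compute_length_buffer (a :: a2 :: s') - pvCnt a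
              = compute_length_buffer (a2 :: s') := by rw [clb_cons]; ring
          have e2 : compute_length_buffer (b :: t') - pvCnt b
              = compute_length_buffer t' := by rw [clb_cons]; ring
          rw [loopA_pop hc, ih t' hpre']
          simp only [List.map_cons]
          rw [altLoop_step hc, e1, e2]
      · rw [loopA_cond_false hc]
        simp only [List.map_cons]
        rw [altLoop_cond_false hc]

-- ===== VERDICT (by name: the statement is the Claim_ definition above) =====
theorem filter_length_spec : Claim_equal_filter_length := by
  intro s t L _ hpre
  have h := loop_eq L s t hpre
  rw [clb_eq_sum s, clb_eq_sum t] at h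
  exact h
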